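-- pv_equiv track=rewrite | github.com/Cesarsk/PyElementsOfProgrammingInterviews | my_solutions/picking_up_coins.py | maximum_revenue
-- ===== SOURCE A (Python) =====
-- from typing import List
--
-- def maximum_revenue(coins: List[int]) -> int:
--     def compute_maximum_revenue_for_range(a, b):
--         if a > b:  # no coins left
--             return 0
--
--         # means it's unexplored cell
--         if maximum_revenue_for_range[a][b] == 0:
--             max_revenue_picking_a = coins[a] + min(
--                 compute_maximum_revenue_for_range(a + 2, b),  # next player picks A
--                 compute_maximum_revenue_for_range(a + 1, b - 1)  # next player picks B
--             )
--             max_revenue_picking_b = coins[b] + min(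
--                 compute_maximum_revenue_for_range(a, b - 2),  # next player picks B
--                 compute_maximum_revenue_for_range(a + 1, b - 1)  # next player picks A
--             )
--             maximum_revenue_for_range[a][b] = max(max_revenue_picking_a, max_revenue_picking_b)
--         return maximum_revenue_for_range[a][b]
--
--     maximum_revenue_for_range = [[0] * len(coins) for _ in coins]
--     return compute_maximum_revenue_for_range(0, len(coins) - 1)
-- ===== SOURCE B (Python) =====
-- from typing import List
--
-- def maximum_revenue(coins: List[int]) -> int:
--     n = len(coins)
--     if n == 0:
--         return 0
--     dp = [[0] * n for _ in range(n)]
--     for L in range(1, n + 1):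
--         for a in range(0, n - L + 1):
--             b = a + L - 1
--             diag = dp[a + 1][b - 1] if a + 1 <= b - 1 else 0
--             pick_a = coins[a] + min(dp[a + 2][b] if a + 2 <= b else 0, diag)
--             pick_b = coins[b] + min(dp[a][b - 2] if a <= b - 2 else 0, diag)
--             dp[a][b] = pick_a if pick_a >= pick_b else pick_b
--     return dp[0][n - 1]
-- ===== Notes on version B (the rewrite author's own statement) =====
-- stated objective: alternative
-- what changed: Replaces A's top-down memoized recursion (with a zero-sentinel memo table) by a bottom-up iterative DP that fills a table by increasing window length.
import Mathlib
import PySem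

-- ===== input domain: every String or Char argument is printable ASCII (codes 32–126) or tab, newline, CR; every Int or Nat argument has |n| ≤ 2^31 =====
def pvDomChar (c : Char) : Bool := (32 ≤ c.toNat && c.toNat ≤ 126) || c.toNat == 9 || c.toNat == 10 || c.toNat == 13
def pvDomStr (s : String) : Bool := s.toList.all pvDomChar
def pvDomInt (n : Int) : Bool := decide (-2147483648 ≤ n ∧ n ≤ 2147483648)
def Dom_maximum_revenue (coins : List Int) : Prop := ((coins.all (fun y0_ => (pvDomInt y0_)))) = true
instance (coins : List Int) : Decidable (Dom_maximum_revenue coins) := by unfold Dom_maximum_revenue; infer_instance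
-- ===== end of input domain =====

-- B replaces A's top-down memoized recursion (with a 0-sentinel memo table) by a bottom-up
-- iterative DP sweep over increasing window lengths; same values, different decomposition.

-- ===== PORT A =====
-- A's 2D zero-initialized memo table is ported as a Dict keyed by (a, b) with default 0;
-- this is exact because every table access A performs uses in-range indices, and an
-- absent key reads as 0 exactly like A's unexplored (zero-initialized) cell.
def computeA (coins : List Int) (a b : Int) (m : PySem.Dict (Int × Int) Int) :
    Int × PySem.Dict (Int × Int) Int :=
  if _hab : a > b then (0, m)
  else
    if m.getD (a, b) 0 = 0 then
      let r1 := computeA coins (a + 2) b m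
      let r2 := computeA coins (a + 1) (b - 1) r1.2
      let ra := (PySem.List.pyGet? coins a).getD 0 + min r1.1 r2.1
      let r3 := computeA coins a (b - 2) r2.2
      let r4 := computeA coins (a + 1) (b - 1) r3.2
      let rb := (PySem.List.pyGet? coins b).getD 0 + min r3.1 r4.1
      let m' := r4.2.insert (a, b) (max ra rb)
      (m'.getD (a, b) 0, m')
    else (m.getD (a, b) 0, m)
termination_by (b - a + 1).toNat
decreasing_by all_goals omega

def maximum_revenue (coins : List Int) : Int :=
  (computeA coins 0 ((coins.length : Int) - 1) PySem.Dict.empty).1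

-- ===== PORT B =====
-- B's 2D zero-initialized dp table is ported as a Dict keyed by (a, b); this is exact
-- because every read Source B performs is guarded to an in-range, already-written cell.
def bStep (coins : List Int) (L : Int) (dp : PySem.Dict (Int × Int) Int) (a : Int) :
    PySem.Dict (Int × Int) Int :=
  let b := a + L - 1
  let diag := if a + 1 ≤ b - 1 then dp.getD (a + 1, b - 1) 0 else 0
  let pick_a := (PySem.List.pyGet? coins a).getD 0 +
    min (if a + 2 ≤ b then dp.getD (a + 2, b) 0 else 0) diag
  let pick_b := (PySem.List.pyGet? coins b).getD 0 +
    min (if a ≤ b - 2 then dp.getD (a, b - 2) 0 else 0) diag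
  dp.insert (a, b) (if pick_a ≥ pick_b then pick_a else pick_b)

def maximum_revenue_alt (coins : List Int) : Int :=
  let n : Int := coins.length
  if n = 0 then 0
  else
    let dp := (PySem.List.pyRange 1 (n + 1) 1).foldl
      (fun dp L => (PySem.List.pyRange 0 (n - L + 1) 1).foldl (bStep coins L) dp)
      PySem.Dict.empty
    dp.getD (0, n - 1) 0

-- ===== PRECONDITION & SPEC =====
def Spec_maximum_revenue (coins : List Int) (out : Int) : Prop := out = maximum_revenue_alt coins
instance (coins : List Int) (out : Int) : Decidable (Spec_maximum_revenue coins out) := by unfold Spec_maximum_revenue; infer_instance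

-- ===== CLAIM (what is proved, stated in full; the proofs are below) =====
def Claim_equal_maximum_revenue : Prop := ∀ (coins : List Int), Dom_maximum_revenue coins → Spec_maximum_revenue coins (maximum_revenue coins)

-- ===== LEMMAS AND PROOFS =====

-- the pure game value both ports compute
def gameVal (coins : List Int) (a b : Int) : Int :=
  if a > b then 0
  else
    max ((PySem.List.pyGet? coins a).getD 0 + min (gameVal coins (a + 2) b) (gameVal coins (a + 1) (b - 1)))
        ((PySem.List.pyGet? coins b).getD 0 + min (gameVal coins a (b - 2)) (gameVal coins (a + 1) (b - 1)))
termination_by (b - a + 1).toNat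
decreasing_by all_goals omega

-- A-side invariant: every memo cell is 0 (unexplored) or already the game value
def InvA (coins : List Int) (m : PySem.Dict (Int × Int) Int) : Prop :=
  ∀ p : Int × Int, m.getD p 0 = 0 ∨ m.getD p 0 = gameVal coins p.1 p.2

lemma computeA_correct (coins : List Int) :
    ∀ (k : Nat) (a b : Int) (m : PySem.Dict (Int × Int) Int),
      (b - a + 1).toNat ≤ k → InvA coins m →
      (computeA coins a b m).1 = gameVal coins a b ∧ InvA coins (computeA coins a b m).2 := by
  intro k
  induction k with
  | zero =>
    intro a b m hk hm
    have hab : a > b := by omega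
    refine ⟨?_, ?_⟩
    · rw [computeA, gameVal]; simp [hab]
    · rw [computeA]; simp [hab]; exact hm
  | succ k ih =>
    intro a b m hk hm
    rw [computeA]
    by_cases hab : a > b
    · refine ⟨?_, ?_⟩
      · rw [gameVal]; simp [hab]
      · simp [hab]; exact hm
    · simp only [dif_neg hab]
      by_cases hz : m.getD (a, b) 0 = 0
      · simp only [if_pos hz]
        have h1 := ih (a + 2) b m (by omega) hm
        have h2 := ih (a + 1) (b - 1) (computeA coins (a + 2) b m).2 (by omega) h1.2
        have h3 := ih a (b - 2) (computeA coins (a + 1) (b - 1) (computeA coins (a + 2) b m).2).2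
          (by omega) h2.2
        have h4 := ih (a + 1) (b - 1)
          (computeA coins a (b - 2) (computeA coins (a + 1) (b - 1) (computeA coins (a + 2) b m).2).2).2
          (by omega) h3.2
        have hval :
            max ((PySem.List.pyGet? coins a).getD 0 + min (computeA coins (a + 2) b m).1
                  (computeA coins (a + 1) (b - 1) (computeA coins (a + 2) b m).2).1)
              ((PySem.List.pyGet? coins b).getD 0 + min
                (computeA coins a (b - 2) (computeA coins (a + 1) (b - 1) (computeA coins (a + 2) b m).2).2).1
                (computeA coins (a + 1) (b - 1)
                  (computeA coins a (b - 2) (computeA coins (a + 1) (b - 1) (computeA coins (a + 2) b m).2).2).2).1)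
            = gameVal coins a b := by
          rw [h1.1, h2.1, h3.1, h4.1]
          conv_rhs => rw [gameVal]
          rw [if_neg hab]
        constructor
        · simpa [PySem.Dict.getD_insert] using hval
        · intro p
          rw [PySem.Dict.getD_insert]
          by_cases hp : p = (a, b)
          · rw [if_pos hp, hval, hp]
            exact Or.inr rfl
          · rw [if_neg hp]
            exact h4.2 p
      · simp only [if_neg hz]
        rcases hm (a, b) with h | h
        · exact absurd h hz
        · exact ⟨h, hm⟩

-- B-side invariant during the inner sweep at window length L, frontier acur
def PB (coins : List Int) (n L acur : Int) (dp : PySem.Dict (Int × Int) Int) : Prop :=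
  ∀ a b : Int, 0 ≤ a → a ≤ b → b < n →
    (b - a + 1 ≤ L - 1 ∨ (b - a + 1 = L ∧ a < acur)) →
    dp.getD (a, b) 0 = gameVal coins a b

lemma bStep_value (coins : List Int) (n L a0 : Int) (dp : PySem.Dict (Int × Int) Int)
    (hL : 1 ≤ L) (h0 : 0 ≤ a0) (hub : a0 + L - 1 < n) (hPB : PB coins n L a0 dp) :
    bStep coins L dp a0 = dp.insert (a0, a0 + L - 1) (gameVal coins a0 (a0 + L - 1)) := by
  unfold bStep
  dsimp only
  have hdiag : (if a0 + 1 ≤ a0 + L - 1 - 1 then dp.getD (a0 + 1, a0 + L - 1 - 1) 0 else 0)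
      = gameVal coins (a0 + 1) (a0 + L - 1 - 1) := by
    split_ifs with h
    · exact hPB _ _ (by omega) (by omega) (by omega) (Or.inl (by omega))
    · rw [gameVal, if_pos (by omega)]
  have hleft : (if a0 + 2 ≤ a0 + L - 1 then dp.getD (a0 + 2, a0 + L - 1) 0 else 0)
      = gameVal coins (a0 + 2) (a0 + L - 1) := by
    split_ifs with h
    · exact hPB _ _ (by omega) (by omega) (by omega) (Or.inl (by omega))
    · rw [gameVal, if_pos (by omega)]
  have hright : (if a0 ≤ a0 + L - 1 - 2 then dp.getD (a0, a0 + L - 1 - 2) 0 else 0)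
      = gameVal coins a0 (a0 + L - 1 - 2) := by
    split_ifs with h
    · exact hPB _ _ (by omega) (by omega) (by omega) (Or.inl (by omega))
    · rw [gameVal, if_pos (by omega)]
  rw [hdiag, hleft, hright]
  conv_rhs => rw [gameVal, if_neg (by omega : ¬ a0 > a0 + L - 1)]
  congr 1
  split_ifs <;> omega

lemma PB_step (coins : List Int) (n L a0 : Int) (dp : PySem.Dict (Int × Int) Int)
    (hL : 1 ≤ L) (h0 : 0 ≤ a0) (hub : a0 + L - 1 < n) (hPB : PB coins n L a0 dp) :
    PB coins n L (a0 + 1) (bStep coins L dp a0) := by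
  intro a b ha hab hbn hcase
  rw [bStep_value coins n L a0 dp hL h0 hub hPB, PySem.Dict.getD_insert]
  by_cases hp : ((a, b) : Int × Int) = (a0, a0 + L - 1)
  · rw [if_pos hp]
    have h1 : a = a0 := congrArg Prod.fst hp
    have h2 : b = a0 + L - 1 := congrArg Prod.snd hp
    rw [h1, h2]
  · rw [if_neg hp]
    apply hPB a b ha hab hbn
    rcases hcase with h | ⟨hlen, halt⟩
    · exact Or.inl h
    · refine Or.inr ⟨hlen, ?_⟩
      rcases lt_or_eq_of_le (by omega : a ≤ a0) with h' | h'
      · exact h'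
      · exfalso
        apply hp
        have hb : b = a0 + L - 1 := by omega
        rw [h', hb]

lemma innerB (coins : List Int) (n L : Int) (hL : 1 ≤ L) :
    ∀ (k : Nat) (a0 : Int) (dp : PySem.Dict (Int × Int) Int),
      (n - L + 1 - a0).toNat ≤ k → 0 ≤ a0 → PB coins n L a0 dp →
      PB coins n L (n - L + 1)
        ((PySem.List.pyRange a0 (n - L + 1) 1).foldl (bStep coins L) dp) := by
  intro k
  induction k with
  | zero =>
    intro a0 dp hk h0 hPB
    rw [PySem.List.pyRange_one_eq_nil (by omega)]
    intro a b ha hab hbn hcase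
    exact hPB a b ha hab hbn (by rcases hcase with h | ⟨h1, h2⟩; exact Or.inl h; exact Or.inr ⟨h1, by omega⟩)
  | succ k ih =>
    intro a0 dp hk h0 hPB
    by_cases hlt : a0 < n - L + 1
    · rw [PySem.List.pyRange_one_cons hlt, List.foldl_cons]
      exact ih (a0 + 1) (bStep coins L dp a0) (by omega) (by omega)
        (PB_step coins n L a0 dp hL h0 (by omega) hPB)
    · rw [PySem.List.pyRange_one_eq_nil (by omega)]
      intro a b ha hab hbn hcase
      exact hPB a b ha hab hbn (by rcases hcase with h | ⟨h1, h2⟩; exact Or.inl h; exact Or.inr ⟨h1, by omega⟩)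

-- all windows of length ≤ m are correct in dp
def GLen (coins : List Int) (n m : Int) (dp : PySem.Dict (Int × Int) Int) : Prop :=
  ∀ a b : Int, 0 ≤ a → a ≤ b → b < n → b - a + 1 ≤ m → dp.getD (a, b) 0 = gameVal coins a b

lemma outerB (coins : List Int) (n : Int) :
    ∀ (k : Nat) (L0 : Int) (dp : PySem.Dict (Int × Int) Int),
      (n + 1 - L0).toNat ≤ k → 1 ≤ L0 → GLen coins n (L0 - 1) dp →
      GLen coins n n
        ((PySem.List.pyRange L0 (n + 1) 1).foldl
          (fun dp L => (PySem.List.pyRange 0 (n - L + 1) 1).foldl (bStep coins L) dp) dp) := by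
  intro k
  induction k with
  | zero =>
    intro L0 dp hk hL0 hGL
    rw [PySem.List.pyRange_one_eq_nil (by omega)]
    intro a b ha hab hbn hlen
    exact hGL a b ha hab hbn (by omega)
  | succ k ih =>
    intro L0 dp hk hL0 hGL
    by_cases hlt : L0 < n + 1
    · rw [PySem.List.pyRange_one_cons hlt, List.foldl_cons]
      apply ih (L0 + 1) _ (by omega) (by omega)
      have hPB0 : PB coins n L0 0 dp := by
        intro a b ha hab hbn hcase
        exact hGL a b ha hab hbn (by omega)
      have h := innerB coins n L0 hL0 (n - L0 + 1 - 0).toNat 0 dp (by omega) (by omega) hPB0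
      intro a b ha hab hbn hlen
      exact h a b ha hab hbn (by omega)
    · rw [PySem.List.pyRange_one_eq_nil (by omega)]
      intro a b ha hab hbn hlen
      exact hGL a b ha hab hbn (by omega)

lemma maximum_revenue_eq_gameVal (coins : List Int) :
    maximum_revenue coins = gameVal coins 0 ((coins.length : Int) - 1) := by
  have hInv : InvA coins PySem.Dict.empty := by
    intro p; left; simp [PySem.Dict.getD_empty]
  exact (computeA_correct coins ((coins.length : Int) - 0 + 1).toNat 0
    ((coins.length : Int) - 1) PySem.Dict.empty (by omega) hInv).1

lemma maximum_revenue_alt_eq_gameVal (coins : List Int) :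
    maximum_revenue_alt coins = gameVal coins 0 ((coins.length : Int) - 1) := by
  unfold maximum_revenue_alt
  by_cases hn : (coins.length : Int) = 0
  · simp only [hn]
    rw [if_pos trivial, gameVal]
    norm_num
  · simp only [if_neg hn]
    have hGL0 : GLen coins (coins.length : Int) (1 - 1) PySem.Dict.empty := by
      intro a b ha hab hbn hlen; omega
    have h := outerB coins (coins.length : Int) ((coins.length : Int) + 1 - 1).toNat 1
      PySem.Dict.empty (by omega) (by omega) hGL0
    exact h 0 ((coins.length : Int) - 1) (by omega) (by omega) (by omega) (by omega)

-- ===== VERDICT (by name: the statement is the Claim_ definition above) =====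
theorem maximum_revenue_spec : Claim_equal_maximum_revenue := by
  intro coins _
  unfold Spec_maximum_revenue
  rw [maximum_revenue_eq_gameVal, maximum_revenue_alt_eq_gameVal]
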